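-- pv_equiv track=rewrite | github.com/carden-code/algorithms | d_random_weather.py | get_weather_randomness
-- ===== SOURCE A (Python) =====
-- from typing import List
--
-- def get_weather_randomness(temperatures: List[int]) -> int:
--     result = 0
--     for index, _ in enumerate(temperatures):
--         slice = temperatures[index:index + 3]
--         if len(slice) == 3:
--             if slice[0] < slice[1] > slice[2]:
--                 result += 1
--         elif len(temperatures) == 1:
--             result = 1
--     else:
--         if len(temperatures) > 1:
--             if temperatures[0] > temperatures[1]:
--                 result += 1
--
--             if temperatures[-1] > temperatures[-2]:
--                 result += 1
--     return result
-- ===== SOURCE B (Python) =====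
-- def get_weather_randomness(temperatures):
--     if not temperatures:
--         return 0
--     count = 0
--     up = True  # current element strictly beats its left neighbour (or has none)
--     for a, b in zip(temperatures, temperatures[1:]):
--         if b < a:
--             if up:
--                 count += 1
--             up = False
--         else:
--             up = b > a
--     if up:
--         count += 1
--     return count
-- ===== Notes on version B (the rewrite author's own statement) =====
-- stated objective: alternative
-- what changed: Replaces A's indexed scan over 3-element window slices plus a separate post-loop boundary-edge pass and a single-element special case with a state machine over adjacent pairs: one 'rising' flag, a peak emitted exactly when a strict drop ends a rise, the final rise closed after the loop, with no list indexing or slice allocation at all.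
import Mathlib
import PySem

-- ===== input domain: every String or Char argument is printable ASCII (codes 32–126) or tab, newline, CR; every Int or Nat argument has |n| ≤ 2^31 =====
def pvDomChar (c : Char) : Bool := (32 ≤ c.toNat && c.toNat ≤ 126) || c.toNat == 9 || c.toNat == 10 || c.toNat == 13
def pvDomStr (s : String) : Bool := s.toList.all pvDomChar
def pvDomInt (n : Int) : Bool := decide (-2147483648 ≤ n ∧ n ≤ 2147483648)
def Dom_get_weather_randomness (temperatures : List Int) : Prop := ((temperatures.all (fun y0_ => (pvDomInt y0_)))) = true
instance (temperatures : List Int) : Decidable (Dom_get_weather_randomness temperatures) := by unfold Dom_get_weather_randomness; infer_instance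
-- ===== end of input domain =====

-- B replaces A's indexed scan over 3-element window slices plus a separate post-loop boundary
-- pass and a single-element special case by a state machine over adjacent pairs that keeps one
-- 'rising' flag and counts a peak each time a strict drop ends a rise (objective: alternative).

-- ===== PORT A =====
-- literal transliteration of A: enumerate loop over 3-slices, then the post-loop boundary checks.
-- all pyGetD accesses are guarded in range (slice length 3 / list length > 1), default never used.
def get_weather_randomness (temperatures : List Int) : Int :=
  let result : Int :=
    (PySem.List.enumerate temperatures).foldl (fun result p =>
      let sl := PySem.List.slice temperatures (some p.1) (some (p.1 + 3))
      if PySem.List.len sl = 3 then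
        if PySem.List.pyGetD sl 0 0 < PySem.List.pyGetD sl 1 0 ∧
           PySem.List.pyGetD sl 1 0 > PySem.List.pyGetD sl 2 0 then result + 1 else result
      else if PySem.List.len temperatures = 1 then 1 else result) 0
  if PySem.List.len temperatures > 1 then
    let result := if PySem.List.pyGetD temperatures 0 0 > PySem.List.pyGetD temperatures 1 0
                  then result + 1 else result
    if PySem.List.pyGetD temperatures (-1) 0 > PySem.List.pyGetD temperatures (-2) 0
    then result + 1 else result
  else result

-- ===== PORT B =====
-- literal transliteration of Source B: state over zip(t, t[1:]) = (count, up); after the loop a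
-- still-open rise closes the last peak; the empty list returns 0 up front as in Source B.
def get_weather_randomness_alt (temperatures : List Int) : Int :=
  match temperatures with
  | [] => 0
  | _ :: _ =>
    let s : Int × Bool :=
      (temperatures.zip (PySem.List.slice temperatures (some 1) none)).foldl
        (fun s p =>
          if p.2 < p.1 then (if s.2 then s.1 + 1 else s.1, false)
          else (s.1, decide (p.2 > p.1))) (0, true)
    if s.2 then s.1 + 1 else s.1

-- ===== PRECONDITION & SPEC =====
def Spec_get_weather_randomness (temperatures : List Int) (out : Int) : Prop := out = get_weather_randomness_alt temperatures
instance (temperatures : List Int) (out : Int) : Decidable (Spec_get_weather_randomness temperatures out) := by unfold Spec_get_weather_randomness; infer_instance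

-- ===== CLAIM (what is proved, stated in full; the proofs are below) =====
def Claim_equal_get_weather_randomness : Prop := ∀ (temperatures : List Int), Dom_get_weather_randomness temperatures → Spec_get_weather_randomness temperatures (get_weather_randomness temperatures)

-- ===== LEMMAS AND PROOFS =====

-- interior-peak condition tested by A at loop index k (slice has length 3 and its middle is a strict peak)
def Qa (t : List Int) (k : Nat) : Bool :=
  decide (k + 3 ≤ t.length) && decide (t.getD k 0 < t.getD (k + 1) 0) &&
  decide (t.getD (k + 1) 0 > t.getD (k + 2) 0)

-- per-index local-maximum predicate (the common ground both programs are reduced to)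
def Pb (t : List Int) (n : Nat) (i : Nat) : Bool :=
  ((i == 0) || (t.getD i 0 > t.getD (i - 1) 0)) &&
  ((i == n - 1) || (t.getD i 0 > t.getD (i + 1) 0))

-- generalized local-maximum predicate with the first index's "beats left" status given as u
def Pb' (u : Bool) (t : List Int) (i : Nat) : Bool :=
  (if i = 0 then u else decide (t.getD i 0 > t.getD (i - 1) 0)) &&
  ((i == t.length - 1) || decide (t.getD i 0 > t.getD (i + 1) 0))

-- recursive specification of B's state machine: peaks of prev::l, prev's left status = up
def Sb (prev : Int) (l : List Int) (up : Bool) : Int :=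
  match l with
  | [] => if up then 1 else 0
  | b :: tl => (if up ∧ prev > b then 1 else 0) + Sb b tl (decide (b > prev))

lemma zipfold (xs : List Int) : ∀ (prev count : Int) (up : Bool),
    (let s := ((prev :: xs).zip xs).foldl
        (fun s p =>
          if p.2 < p.1 then (if s.2 then s.1 + 1 else s.1, false)
          else (s.1, decide (p.2 > p.1))) (count, up)
     if s.2 then s.1 + 1 else s.1) = count + Sb prev xs up := by
  induction xs with
  | nil => intro prev count up; cases up <;> simp [Sb]
  | cons b tl ih =>
    intro prev count up
    simp only [List.zip_cons_cons, List.foldl_cons]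
    by_cases h : b < prev
    · have h2 : ¬ b > prev := by omega
      cases up <;> simp [h, h2, Sb, ih b] <;> ring
    · cases up <;> simp [h, Sb, ih b]

lemma Sb_countP (xs : List Int) : ∀ (prev : Int) (up : Bool),
    Sb prev xs up = ((List.range (xs.length + 1)).countP (Pb' up (prev :: xs)) : Int) := by
  induction xs with
  | nil => intro prev up; cases up <;> simp [Sb, Pb', List.range_succ]
  | cons b tl ih =>
    intro prev up
    have hshift : ∀ i ∈ List.range (tl.length + 1),
        (Pb' up (prev :: b :: tl) ∘ Nat.succ) i = Pb' (decide (b > prev)) (b :: tl) i := by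
      intro i _
      cases i with
      | zero => cases tl <;> simp [Pb']
      | succ j =>
        have hb : (j + 1 + 1 == tl.length + 1 + 1 - 1) = (j + 1 == tl.length + 1 - 1) := by
          simp
        simp only [Function.comp_apply, Pb', List.length_cons]
        rw [hb]
        simp
    have h0 : Pb' up (prev :: b :: tl) 0 = (up && decide (prev > b)) := by
      simp [Pb']
    calc Sb prev (b :: tl) up
        = (if up ∧ prev > b then 1 else 0) + Sb b tl (decide (b > prev)) := rfl
      _ = (if up ∧ prev > b then 1 else 0)
            + ((List.range (tl.length + 1)).countP (Pb' (decide (b > prev)) (b :: tl)) : Int) := by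
          rw [ih]
      _ = _ := by
          have hc : List.countP (Pb' up (prev :: b :: tl) ∘ Nat.succ) (List.range (tl.length + 1))
              = List.countP (Pb' (decide (b > prev)) (b :: tl)) (List.range (tl.length + 1)) :=
            List.countP_congr (fun i hi => by rw [hshift i hi])
          have hrhs : ((List.countP (Pb' up (prev :: b :: tl)) (List.range ((b :: tl).length + 1)) : Nat) : Int)
              = (if Pb' up (prev :: b :: tl) 0 = true then 1 else 0)
                + ((List.countP (Pb' (decide (b > prev)) (b :: tl)) (List.range (tl.length + 1)) : Nat) : Int) := by
            rw [show ((b :: tl).length + 1) = (tl.length + 1) + 1 by simp,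
                List.range_succ_eq_map, List.countP_cons, List.countP_map, hc]
            push_cast
            split_ifs <;> ring
          rw [hrhs, h0]
          cases up <;> by_cases hpb : prev > b <;> simp [hpb]

lemma Pb'_true (t : List Int) (i : Nat) : Pb' true t i = Pb t t.length i := by
  cases i <;> simp [Pb', Pb]

lemma altB (t : List Int) :
    get_weather_randomness_alt t
      = ((List.range t.length).countP (Pb t t.length) : Int) := by
  cases t with
  | nil => simp [get_weather_randomness_alt]
  | cons x xs =>
    unfold get_weather_randomness_alt
    rw [PySem.List.slice_from_one]
    simp only [List.tail_cons]
    rw [zipfold xs x 0 true, Sb_countP, List.countP_congr (fun i _ => by rw [Pb'_true (x :: xs) i])]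
    simp

lemma sliceA (t : List Int) (k : Nat) :
    PySem.List.slice t (some (k : Int)) (some ((k : Int) + 3)) = (t.drop k).take 3 := by
  exact_mod_cast PySem.List.slice_natCast_add t k 3

lemma take3 (t : List Int) (k : Nat) (h : k + 3 ≤ t.length) :
    (t.drop k).take 3 = [t.getD k 0, t.getD (k+1) 0, t.getD (k+2) 0] := by
  apply List.ext_getElem
  · simp [List.length_take, List.length_drop]; omega
  · intro i h1 h2
    have hi : i < 3 := by simpa using h2
    interval_cases i <;>
      · simp only [List.getElem_take, List.getElem_drop, List.getElem_cons_zero,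
          List.getElem_cons_succ, Nat.add_zero]
        symm
        apply List.getD_eq_getElem

lemma loopA (t : List Int) (h : t.length ≠ 1) :
    (PySem.List.enumerate t).foldl (fun result p =>
      let sl := PySem.List.slice t (some p.1) (some (p.1 + 3))
      if PySem.List.len sl = 3 then
        if PySem.List.pyGetD sl 0 0 < PySem.List.pyGetD sl 1 0 ∧
           PySem.List.pyGetD sl 1 0 > PySem.List.pyGetD sl 2 0 then result + 1 else result
      else if PySem.List.len t = 1 then 1 else result) 0
      = ((List.range t.length).countP (Qa t) : Int) := by
  rw [PySem.List.enumerate_eq_map_pyRange t 0, List.foldl_map, PySem.List.len_eq t,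
      PySem.List.pyRange_zero_nat, List.foldl_map]
  rw [PySem.List.foldl_congr_mem _ _
    (fun (acc : Int) (k : Nat) => if Qa t k then acc + 1 else acc) 0 ?_]
  · simpa using PySem.List.foldl_if_add_one (Qa t) (List.range t.length) 0
  · intro acc k hk
    simp only [List.mem_range] at hk
    simp only [sliceA t k, PySem.List.len_eq]
    by_cases h3 : k + 3 ≤ t.length
    · rw [take3 t k h3]
      simp [Qa, h3, PySem.List.pyGetD, PySem.List.pyGet?, PySem.List.pyIdx?]
    · have hc : ¬ (((((t.drop k).take 3).length) : Int) = 3) := by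
        simp [List.length_take, List.length_drop]; omega
      have h1 : ¬ ((t.length : Int) = 1) := by exact_mod_cast h
      simp [h1, Qa, h3]
      intro hx
      exact absurd hx (by omega)

-- the central counting identity for lists of length ≥ 2
lemma count_eq (t : List Int) (m : Nat) (hlen : t.length = m + 2) :
    ((List.range t.length).countP (Pb t t.length) : Int)
      = ((List.range t.length).countP (Qa t) : Int)
        + (if t.getD 0 0 > t.getD 1 0 then (1:Int) else 0)
        + (if t.getD (m+1) 0 > t.getD m 0 then (1:Int) else 0) := by
  have hmid : List.countP (fun k => Pb t (m+2) (k+1)) (List.range m)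
      = List.countP (Qa t) (List.range m) := by
    apply List.countP_congr
    intro k hk
    have hk' : k < m := List.mem_range.mp hk
    have h3 : decide (k + 3 ≤ t.length) = true := by simp [hlen]; omega
    simp [Pb, Qa, h3, show k ≠ m by omega]
  have q1 : Qa t m = false := by
    simp [Qa, hlen]
  have q2 : Qa t (m+1) = false := by
    simp [Qa, hlen]
  have hA : List.countP (Qa t) (List.range (m+2)) = List.countP (Qa t) (List.range m) := by
    rw [show m + 2 = (m+1) + 1 from rfl, List.range_succ, List.countP_append,
        List.range_succ, List.countP_append]
    simp [q1, q2]
  have hB : List.countP (Pb t (m+2)) (List.range (m+2))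
      = (if t.getD 0 0 > t.getD 1 0 then 1 else 0) + List.countP (Qa t) (List.range m)
        + (if t.getD (m+1) 0 > t.getD m 0 then 1 else 0) := by
    rw [show m + 2 = (m+1) + 1 from rfl, List.range_succ_eq_map, List.countP_cons,
        List.range_succ, List.map_append, List.countP_append, List.countP_map]
    have em : List.countP (Pb t ((m+1) + 1) ∘ Nat.succ) (List.range m)
        = List.countP (Qa t) (List.range m) := by
      rw [← hmid]
      apply List.countP_congr
      intro k _
      simp [Function.comp, Nat.succ_eq_add_one]
    have eb0 : Pb t ((m+1) + 1) 0 = decide (t.getD 0 0 > t.getD 1 0) := by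
      simp [Pb]
    have ebl : Pb t ((m+1) + 1) (Nat.succ m) = decide (t.getD (m+1) 0 > t.getD m 0) := by
      simp [Pb, Nat.succ_eq_add_one]
    rw [em, eb0]
    simp only [List.map_cons, List.map_nil, List.countP_cons, List.countP_nil, ebl,
      decide_eq_true_eq]
    split_ifs <;> omega
  rw [hlen, hB, hA]
  push_cast
  split_ifs <;> omega

-- ===== VERDICT (by name: the statement is the Claim_ definition above) =====
theorem get_weather_randomness_spec : Claim_equal_get_weather_randomness := by
  intro t _
  unfold Spec_get_weather_randomness
  cases t with
  | nil => decide
  | cons x xs =>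
    cases xs with
    | nil =>
      simp [get_weather_randomness, get_weather_randomness_alt,
            PySem.List.enumerate_cons, PySem.List.enumerate_nil,
            PySem.List.slice, PySem.List.clampIdx, PySem.List.len_eq]
    | cons y ys =>
      have hlen : (x :: y :: ys).length = ys.length + 2 := by simp
      have g1 : PySem.List.pyGetD (x :: y :: ys) 1 0 = (x :: y :: ys).getD 1 0 :=
        PySem.List.pyGetD_ofNat' _ 1 0
      have gm1 : PySem.List.pyGetD (x :: y :: ys) (-1) 0 = (x :: y :: ys).getD (ys.length + 1) 0 := by
        rw [PySem.List.pyGetD_neg_ofNat _ 1 0 (by omega) (by simp)]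
        rw [List.getD_eq_getElem _ _ (by simp)]
        simp
      have gm2 : PySem.List.pyGetD (x :: y :: ys) (-2) 0 = (x :: y :: ys).getD ys.length 0 := by
        rw [PySem.List.pyGetD_neg_ofNat _ 2 0 (by omega) (by simp)]
        rw [List.getD_eq_getElem _ _ (by simp)]
        simp
        try rfl
      unfold get_weather_randomness
      rw [loopA (x :: y :: ys) (by simp)]
      rw [altB, count_eq _ ys.length hlen]
      simp only [PySem.List.len_eq, PySem.List.pyGetD_zero, g1, gm1, gm2, hlen]
      split_ifs <;> omega
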